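-- pv_equiv track=rewrite | github.com/AnushreeBagchi/Learning-Data-Structures-and-Algorithm-Python | min-array.py | smallest_positive
-- ===== SOURCE A (Python) =====
-- def smallest_positive(in_list):
--     # TODO: Define a control structure that finds the smallest positive
--     # number in in_list and returns the correct smallest number.
--
--     temp = in_list[0];
--
--     for i, value in enumerate (in_list):
--         if value > 0:
--             temp = value;
--             break;
--
--
--     for i, value in enumerate (in_list):
--         if(value < temp and value > 0):
--             temp = value
--
--     if temp > 0:
--         return temp;
--     else:
--         return None
-- ===== SOURCE B (Python) =====
-- def smallest_positive(in_list):
--     for value in sorted(in_list):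
--         if value > 0:
--             return value
--     return None
-- ===== Notes on version B (the rewrite author's own statement) =====
-- stated objective: alternative
-- what changed: B sorts the list and returns the first positive element of the sorted order, instead of A's two sequential scans (seed the first positive, then minimize).
import Mathlib
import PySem

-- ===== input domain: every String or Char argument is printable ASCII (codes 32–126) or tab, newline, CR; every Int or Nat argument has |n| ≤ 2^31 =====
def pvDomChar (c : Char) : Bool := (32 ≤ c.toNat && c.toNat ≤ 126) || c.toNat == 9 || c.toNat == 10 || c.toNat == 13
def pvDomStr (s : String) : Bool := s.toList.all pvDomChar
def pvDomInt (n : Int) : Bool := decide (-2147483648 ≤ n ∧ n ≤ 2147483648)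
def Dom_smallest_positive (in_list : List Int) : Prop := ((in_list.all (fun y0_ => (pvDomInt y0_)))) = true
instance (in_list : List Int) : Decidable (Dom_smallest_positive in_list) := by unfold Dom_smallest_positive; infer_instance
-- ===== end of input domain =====

-- B sorts the list and takes the first positive element of the sorted order, replacing A's two scans; A raises IndexError on [], excluded by Pre_.


-- ===== PORT A =====
-- first loop of A: scan for the first positive value, break on finding it
def spFirstLoop : List Int → Option Int
  | [] => none
  | v :: rest => if v > 0 then some v else spFirstLoop rest

-- second loop of A: fold keeping the smallest positive seen, seeded with temp
def spSecondLoop (temp : Int) (l : List Int) : Int :=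
  l.foldl (fun temp v => if v < temp ∧ v > 0 then v else temp) temp

def smallest_positive (in_list : List Int) : Option Int :=
  match in_list with
  | [] => none  -- in_list[0] raises IndexError here; excluded by Pre_
  | x :: _ =>
    let temp := (spFirstLoop in_list).getD x
    let temp := spSecondLoop temp in_list
    if temp > 0 then some temp else none

-- ===== PORT B =====
-- B's loop over sorted(in_list) returns the first element with value > 0, else None: List.find?
def smallest_positive_alt (in_list : List Int) : Option Int :=
  (PySem.List.sorted in_list (fun x => x) false).find? (fun v => decide (0 < v))

-- ===== PRECONDITION & SPEC =====
-- Pre_ excludes only the empty list, on which A raises IndexError.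
def Pre_smallest_positive (in_list : List Int) : Prop := in_list ≠ []
instance (in_list : List Int) : Decidable (Pre_smallest_positive in_list) := by unfold Pre_smallest_positive; infer_instance
def pvWitness_smallest_positive : List Int := [3, -1, 2]

def Spec_smallest_positive (in_list : List Int) (out : Option Int) : Prop := out = smallest_positive_alt in_list
instance (in_list : List Int) (out : Option Int) : Decidable (Spec_smallest_positive in_list out) := by unfold Spec_smallest_positive; infer_instance

-- ===== CLAIM (what is proved, stated in full; the proofs are below) =====
def Claim_equal_smallest_positive : Prop := ∀ (in_list : List Int), Dom_smallest_positive in_list → Pre_smallest_positive in_list → Spec_smallest_positive in_list (smallest_positive in_list)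
-- ===== LEMMAS AND PROOFS =====

-- ---- facts about A's loops ----

lemma firstLoop_pos (l : List Int) (p : Int) (h : spFirstLoop l = some p) : 0 < p := by
  induction l with
  | nil => simp [spFirstLoop] at h
  | cons a b ih =>
    simp only [spFirstLoop] at h
    by_cases ha : a > 0
    · simp [ha] at h; omega
    · exact ih (by simpa [ha] using h)

lemma firstLoop_mem (l : List Int) (p : Int) (h : spFirstLoop l = some p) : p ∈ l := by
  induction l with
  | nil => simp [spFirstLoop] at h
  | cons a b ih =>
    simp only [spFirstLoop] at h
    by_cases ha : a > 0
    · simp [ha] at h; simp [h]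
    · exact List.mem_cons_of_mem _ (ih (by simpa [ha] using h))

lemma firstLoop_none (l : List Int) (h : spFirstLoop l = none) :
    ∀ y ∈ l, ¬ 0 < y := by
  induction l with
  | nil => simp
  | cons a b ih =>
    simp only [spFirstLoop] at h
    by_cases ha : a > 0
    · simp [ha] at h
    · intro y hy
      rcases List.mem_cons.mp hy with rfl | hy'
      · omega
      · exact ih (by simpa [ha] using h) y hy'

lemma secondLoop_le_seed (l : List Int) (t : Int) : spSecondLoop t l ≤ t := by
  induction l generalizing t with
  | nil => simp [spSecondLoop]
  | cons v rest ih =>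
    simp only [spSecondLoop, List.foldl]
    by_cases h : v < t ∧ v > 0
    · rw [if_pos h]
      have := ih v; simp only [spSecondLoop] at this; omega
    · rw [if_neg h]
      exact ih t

lemma secondLoop_mem (l : List Int) (t : Int) :
    spSecondLoop t l = t ∨ spSecondLoop t l ∈ l := by
  induction l generalizing t with
  | nil => simp [spSecondLoop]
  | cons v rest ih =>
    simp only [spSecondLoop, List.foldl]
    by_cases h : v < t ∧ v > 0
    · rcases ih v with h1 | h1 <;> simp [h, spSecondLoop] at * <;> simp [h1]
    · rcases ih t with h1 | h1 <;> simp [h, spSecondLoop] at * <;> simp [h1]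

lemma secondLoop_pos (l : List Int) (t : Int) (ht : 0 < t) : 0 < spSecondLoop t l := by
  induction l generalizing t with
  | nil => simpa [spSecondLoop]
  | cons v rest ih =>
    simp only [spSecondLoop, List.foldl]
    by_cases h : v < t ∧ v > 0
    · simpa [h, spSecondLoop] using ih v h.2
    · simpa [h, spSecondLoop] using ih t ht

lemma secondLoop_min (l : List Int) (t : Int) :
    ∀ y ∈ l, 0 < y → spSecondLoop t l ≤ y := by
  induction l generalizing t with
  | nil => simp
  | cons v rest ih =>
    intro y hy hypos
    simp only [spSecondLoop, List.foldl]
    by_cases h : v < t ∧ v > 0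
    · rw [if_pos h]
      rcases List.mem_cons.mp hy with rfl | hy'
      · simpa [spSecondLoop] using secondLoop_le_seed rest y
      · simpa [spSecondLoop] using ih v y hy' hypos
    · rw [if_neg h]
      rcases List.mem_cons.mp hy with rfl | hy'
      · have hle := secondLoop_le_seed rest t
        simp only [spSecondLoop] at hle
        omega
      · simpa [spSecondLoop] using ih t y hy' hypos

lemma secondLoop_nopos (l : List Int) (t : Int) (h : ∀ y ∈ l, ¬ 0 < y) :
    spSecondLoop t l = t := by
  induction l generalizing t with
  | nil => simp [spSecondLoop]
  | cons v rest ih =>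
    have hv : ¬ 0 < v := h v (by simp)
    have : ¬ (v < t ∧ v > 0) := by omega
    simp only [spSecondLoop, List.foldl, if_neg this]
    exact ih t (fun y hy => h y (List.mem_cons_of_mem _ hy))

-- ---- facts about B's scan over the sorted list ----

lemma findPos_none (l : List Int)
    (h : l.find? (fun v => decide (0 < v)) = none) : ∀ y ∈ l, ¬ 0 < y := by
  intro y hy
  have := List.find?_eq_none.mp h y hy
  simpa using this

lemma findPos_some_sorted (l : List Int) (m : Int)
    (hp : l.Pairwise (· ≤ ·)) (h : l.find? (fun v => decide (0 < v)) = some m) :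
    m ∈ l ∧ 0 < m ∧ ∀ y ∈ l, 0 < y → m ≤ y := by
  induction l with
  | nil => simp at h
  | cons a b ih =>
    rcases List.pairwise_cons.mp hp with ⟨hall, hp'⟩
    by_cases ha : 0 < a
    · rw [List.find?_cons_of_pos (by simpa using ha)] at h
      injection h with h
      subst h
      refine ⟨by simp, ha, ?_⟩
      intro y hy _
      rcases List.mem_cons.mp hy with rfl | hy'
      · exact le_rfl
      · exact hall y hy'
    · rw [List.find?_cons_of_neg (by simpa using ha)] at h
      rcases ih hp' h with ⟨hm, hmp, hmin⟩
      refine ⟨List.mem_cons_of_mem _ hm, hmp, ?_⟩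
      intro y hy hypos
      rcases List.mem_cons.mp hy with rfl | hy'
      · omega
      · exact hmin y hy' hypos

-- ===== VERDICT (by name: the statement is the Claim_ definition above) =====
theorem smallest_positive_spec : Claim_equal_smallest_positive := by
  intro l _ hpre
  unfold Spec_smallest_positive smallest_positive_alt
  set s := PySem.List.sorted l (fun x => x) false with hs
  have hperm : s.Perm l := PySem.List.sorted_perm l _ _
  have hpair : s.Pairwise (· ≤ ·) := by
    simpa using PySem.List.sorted_pairwise l (fun x => x)
  match l, hpre with
  | x :: rest, _ =>
    cases hf : spFirstLoop (x :: rest) with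
    | none =>
      have hnone := firstLoop_none _ hf
      have hx : ¬ 0 < x := hnone x (by simp)
      have h2 := secondLoop_nopos (x :: rest) x hnone
      cases hb : s.find? (fun v => decide (0 < v)) with
      | none => simp [smallest_positive, hf, h2, hx]
      | some m =>
        have hmpos : 0 < m := by simpa using List.find?_some hb
        have hmem : m ∈ s := List.mem_of_find?_eq_some hb
        exact absurd hmpos (hnone m (hperm.mem_iff.mp hmem))
    | some p =>
      have hppos := firstLoop_pos _ _ hf
      have hpmem := firstLoop_mem _ _ hf
      set M := spSecondLoop p (x :: rest) with hM
      have hMpos : 0 < M := secondLoop_pos _ _ hppos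
      have hMmem : M ∈ (x :: rest) := by
        rcases secondLoop_mem (x :: rest) p with h | h
        · rw [hM, h]; exact hpmem
        · exact h
      have hMmin := secondLoop_min (x :: rest) p
      -- B's side: the sorted list contains a positive element, so find? succeeds
      cases hb : s.find? (fun v => decide (0 < v)) with
      | none =>
        exact absurd hMpos (findPos_none s hb M (hperm.mem_iff.mpr hMmem))
      | some m =>
        rcases findPos_some_sorted s m hpair hb with ⟨hmmem, hmpos, hmmin⟩
        have h1 : M ≤ m := hMmin m (hperm.mem_iff.mp hmmem) hmpos
        have h2 : m ≤ M := hmmin M (hperm.mem_iff.mpr hMmem) hMpos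
        have : M = m := le_antisymm h1 h2
        simp [smallest_positive, hf, ← hM, this, hmpos]
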